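-- pv_equiv track=rewrite | github.com/anshumaneducation/cyber-security-trainer | Cryptography/sDES.py | sdes_decrypt
-- ===== SOURCE A (Python) =====
-- P10 = [3, 5, 2, 7, 4, 10, 1, 9, 8, 6]  # Permutation P10
--
-- P8 = [6, 3, 7, 4, 8, 5, 10, 9]        # Permutation P8
--
-- P4 = [2, 4, 3, 1]                      # Permutation P4
--
-- IP = [2, 6, 3, 1, 4, 8, 5, 7]          # Initial Permutation IP
--
-- IP_INV = [4, 1, 3, 5, 7, 2, 8, 6]      # Inverse Initial Permutation IP^(-1)
--
-- EP = [4, 1, 2, 3, 2, 3, 4, 1]          # Expansion Permutation EP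
--
-- S0 = [[1, 0, 3, 2],
--       [3, 2, 1, 0],
--       [0, 2, 1, 3],
--       [3, 1, 3, 2]]                     # S-Box S0
--
-- S1 = [[0, 1, 2, 3],
--       [2, 0, 1, 3],
--       [3, 0, 1, 0],
--       [2, 1, 0, 3]]                     # S-Box S1
--
-- def permutate(original, permutation):
--     """Permute the bits according to the given permutation."""
--     return [original[i - 1] for i in permutation]
--
-- def left_shift(bits, shifts):
--     """Left shift the bits by the specified number of shifts."""
--     return bits[shifts:] + bits[:shifts]
--
-- def xor(bits1, bits2):
--     """Perform bitwise XOR between two bit lists."""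
--     return [b1 ^ b2 for b1, b2 in zip(bits1, bits2)]
--
-- def sbox_lookup(bits, sbox):
--     """Lookup the value in the specified S-Box."""
--     row = (bits[0] << 1) | bits[3]
--     col = (bits[1] << 1) | bits[2]
--     return [int(x) for x in format(sbox[row][col], '02b')]
--
-- def generate_keys(key):
--     """Generate the two subkeys from the main key."""
--     key = permutate(key, P10)
--     left, right = key[:5], key[5:]
--
--     left = left_shift(left, 1)
--     right = left_shift(right, 1)
--     k1 = permutate(left + right, P8)
--
--     left = left_shift(left, 2)
--     right = left_shift(right, 2)
--     k2 = permutate(left + right, P8)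
--
--     return k1, k2
--
-- def fk(bits, key):
--     """Feistel function used in the encryption and decryption."""
--     left, right = bits[:4], bits[4:]
--     temp = permutate(right, EP)
--     temp = xor(temp, key)
--     left_half = sbox_lookup(temp[:4], S0)
--     right_half = sbox_lookup(temp[4:], S1)
--     temp = permutate(left_half + right_half, P4)
--     return xor(left, temp) + right
--
-- def sdes_decrypt_block(block, k1, k2):
--     """Decrypt an 8-bit block using the two subkeys."""
--     bits = permutate(block, IP)
--     bits = fk(bits, k2)
--     bits = bits[4:] + bits[:4]  # Switch the left and right halves
--     bits = fk(bits, k1)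
--     plaintext = permutate(bits, IP_INV)
--     return plaintext
--
-- def string_to_bits(s):
--     """Convert a string to a list of bits."""
--     return [int(bit) for char in s for bit in format(ord(char), '08b')]
--
-- def bits_to_string(bits):
--     """Convert a list of bits to a string."""
--     return ''.join(chr(int(''.join(map(str, bits[i:i+8])), 2)) for i in range(0, len(bits), 8))
--
-- def sdes_decrypt(ciphertext, key):
--     """Decrypt a ciphertext string using the given key."""
--     key_bits = string_to_bits(key)
--     ciphertext_bits = string_to_bits(ciphertext)
--     k1, k2 = generate_keys(key_bits[:10])
--
--     plaintext_bits = []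
--     for i in range(0, len(ciphertext_bits), 8):
--         block = ciphertext_bits[i:i+8]
--         plaintext_bits.extend(sdes_decrypt_block(block, k1, k2))
--     return bits_to_string(plaintext_bits)
-- ===== SOURCE B (Python) =====
-- # Decrypt by inversion: implement only the FORWARD (encryption) direction of S-DES on
-- # 8-bit integers, build a 256-entry inverse table once (table[enc(p)] = p), then decrypt
-- # each ciphertext character by a single table lookup.
-- P10 = [3, 5, 2, 7, 4, 10, 1, 9, 8, 6]
-- P8 = [6, 3, 7, 4, 8, 5, 10, 9]
-- P4 = [2, 4, 3, 1]
-- IP = [2, 6, 3, 1, 4, 8, 5, 7]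
-- IP_INV = [4, 1, 3, 5, 7, 2, 8, 6]
-- EP = [4, 1, 2, 3, 2, 3, 4, 1]
-- S0 = [[1, 0, 3, 2], [3, 2, 1, 0], [0, 2, 1, 3], [3, 1, 3, 2]]
-- S1 = [[0, 1, 2, 3], [2, 0, 1, 3], [3, 0, 1, 0], [2, 1, 0, 3]]
--
-- def _perm(v, n, table):
--     """Permute the n-bit integer v (MSB-first positions 1..n) by the table."""
--     out = 0
--     for p in table:
--         out = (out << 1) | ((v >> (n - p)) & 1)
--     return out
--
-- def _rol5(v, s):
--     """Rotate a 5-bit integer left by s."""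
--     return ((v << s) | (v >> (5 - s))) & 0x1F
--
-- def _keys(k10):
--     k = _perm(k10, 10, P10)
--     l, r = (k >> 5) & 0x1F, k & 0x1F
--     l, r = _rol5(l, 1), _rol5(r, 1)
--     k1 = _perm((l << 5) | r, 10, P8)
--     l, r = _rol5(l, 2), _rol5(r, 2)
--     k2 = _perm((l << 5) | r, 10, P8)
--     return k1, k2
--
-- def _sbox(v, sbox):
--     """4-bit value v = b0 b1 b2 b3 (MSB first): row = b0 b3, col = b1 b2."""
--     row = ((v >> 2) & 2) | (v & 1)
--     col = (((v >> 2) & 1) << 1) | ((v >> 1) & 1)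
--     return sbox[row][col]
--
-- def _fk(b, k):
--     l, r = b >> 4, b & 0xF
--     t = _perm(r, 4, EP) ^ k
--     s = (_sbox(t >> 4, S0) << 2) | _sbox(t & 0xF, S1)
--     return ((l ^ _perm(s, 4, P4)) << 4) | r
--
-- def _enc_block(p, k1, k2):
--     """ENCRYPT one 8-bit block (k1 round first, swap, k2 round)."""
--     b = _perm(p, 8, IP)
--     b = _fk(b, k1)
--     b = ((b & 0xF) << 4) | (b >> 4)
--     b = _fk(b, k2)
--     return _perm(b, 8, IP_INV)
--
-- def sdes_decrypt(ciphertext, key):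
--     """Decrypt a ciphertext string using the given key."""
--     k10 = (ord(key[0]) << 2) | (ord(key[1]) >> 6)
--     k1, k2 = _keys(k10)
--     inv = [0] * 256
--     for p in range(256):
--         inv[_enc_block(p, k1, k2)] = p
--     return ''.join(chr(inv[ord(ch)]) for ch in ciphertext)
-- ===== Notes on version B (the rewrite author's own statement) =====
-- stated objective: faster
-- what changed: B never implements decryption at all: it implements only the forward (encryption) direction of S-DES on 8-bit integers with shift/mask permutations, builds a 256-entry inverse lookup table once by encrypting every possible byte (table[enc(p)] = p), and then decrypts each ciphertext character by a single table lookup, instead of A's per-character two-round Feistel decryption on lists of bits.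
import Mathlib
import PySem

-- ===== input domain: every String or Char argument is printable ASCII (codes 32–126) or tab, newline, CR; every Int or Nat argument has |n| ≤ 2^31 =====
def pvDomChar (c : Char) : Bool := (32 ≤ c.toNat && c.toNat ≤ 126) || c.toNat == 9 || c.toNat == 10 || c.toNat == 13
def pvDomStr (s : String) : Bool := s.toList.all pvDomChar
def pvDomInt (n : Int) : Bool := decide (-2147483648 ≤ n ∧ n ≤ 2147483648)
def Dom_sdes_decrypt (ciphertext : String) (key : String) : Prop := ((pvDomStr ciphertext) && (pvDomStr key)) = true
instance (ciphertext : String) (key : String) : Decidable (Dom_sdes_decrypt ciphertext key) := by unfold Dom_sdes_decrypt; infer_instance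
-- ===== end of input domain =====

-- B implements only the forward (encryption) direction of S-DES on 8-bit integers, builds a
-- 256-entry inverse table once, and decrypts by table lookup; the equivalence is about the
-- return value (neither program mutates its arguments).

-- ===== PORT A =====
def pvP10 : List Int := [3, 5, 2, 7, 4, 10, 1, 9, 8, 6]
def pvP8 : List Int := [6, 3, 7, 4, 8, 5, 10, 9]
def pvP4 : List Int := [2, 4, 3, 1]
def pvIP : List Int := [2, 6, 3, 1, 4, 8, 5, 7]
def pvIPINV : List Int := [4, 1, 3, 5, 7, 2, 8, 6]
def pvEP : List Int := [4, 1, 2, 3, 2, 3, 4, 1]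
def pvS0 : List (List Int) := [[1, 0, 3, 2], [3, 2, 1, 0], [0, 2, 1, 3], [3, 1, 3, 2]]
def pvS1 : List (List Int) := [[0, 1, 2, 3], [2, 0, 1, 3], [3, 0, 1, 0], [2, 1, 0, 3]]

-- original[i-1]; an out-of-range index is a Python IndexError, excluded by Pre_ below
def pvPermutate (original : List Int) (permutation : List Int) : List Int :=
  permutation.map (fun i => PySem.List.pyGetD original (i - 1) 0)

def pvLeftShift (bits : List Int) (shifts : Int) : List Int :=
  PySem.List.slice bits (some shifts) none ++ PySem.List.slice bits none (some shifts)

def pvXor (bits1 bits2 : List Int) : List Int :=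
  (bits1.zip bits2).map (fun p => PySem.Int.bxor p.1 p.2)

-- int(x) for a single digit character x = ord(x) - ord('0'); exact on the '0'/'1' digits format produces
def pvDigit (c : Char) : Int := (c.toNat : Int) - 48

-- format(n, '02b') for n ≥ 0: binary digits left-padded with '0' to width 2 (all uses have 0 ≤ n ≤ 3)
def pvFmt2 (n : Int) : List Char := PySem.Chars.zfill (PySem.Int.toBinChars n) 2

def pvSboxLookup (bits : List Int) (sbox : List (List Int)) : List Int :=
  let row := PySem.Int.bor ((PySem.List.pyGetD bits 0 0) <<< (1 : Nat)) (PySem.List.pyGetD bits 3 0)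
  let col := PySem.Int.bor ((PySem.List.pyGetD bits 1 0) <<< (1 : Nat)) (PySem.List.pyGetD bits 2 0)
  (pvFmt2 (PySem.List.pyGetD (PySem.List.pyGetD sbox row []) col 0)).map pvDigit

def pvGenerateKeys (key0 : List Int) : List Int × List Int :=
  let key := pvPermutate key0 pvP10
  let left := PySem.List.slice key none (some 5)
  let right := PySem.List.slice key (some 5) none
  let left1 := pvLeftShift left 1
  let right1 := pvLeftShift right 1
  let k1 := pvPermutate (left1 ++ right1) pvP8
  let left2 := pvLeftShift left1 2
  let right2 := pvLeftShift right1 2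
  let k2 := pvPermutate (left2 ++ right2) pvP8
  (k1, k2)

def pvFk (bits key : List Int) : List Int :=
  let left := PySem.List.slice bits none (some 4)
  let right := PySem.List.slice bits (some 4) none
  let temp := pvXor (pvPermutate right pvEP) key
  let left_half := pvSboxLookup (PySem.List.slice temp none (some 4)) pvS0
  let right_half := pvSboxLookup (PySem.List.slice temp (some 4) none) pvS1
  let temp2 := pvPermutate (left_half ++ right_half) pvP4
  pvXor left temp2 ++ right

def pvDecryptBlock (block k1 k2 : List Int) : List Int :=
  let bits := pvPermutate block pvIP
  let bits2 := pvFk bits k2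
  let bits3 := PySem.List.slice bits2 (some 4) none ++ PySem.List.slice bits2 none (some 4)
  let bits4 := pvFk bits3 k1
  pvPermutate bits4 pvIPINV

-- format(ord(char), '08b') = binary of the code point left-padded with '0' to width 8 (exact for the
-- nonnegative ord); ord(char) is the code point Char.toNat
def pvStringToBits (s : String) : List Int :=
  s.toList.flatMap (fun ch => (PySem.Chars.zfill (PySem.Int.toBinChars ((ch.toNat : Int))) 8).map pvDigit)

-- chr(int(''.join(map(str, chunk)), 2)): str(b) = toChars b, join = flatMap, int(_, 2) = ofCharsBase? _ 2
-- (never ValueError here: chunks are nonempty 0/1 lists, so .getD 0 is exact); chr(v) = Char.ofNat v.toNat,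
-- exact for the 0 ≤ v < 256 values produced
def pvChunkChar (chunk : List Int) : Char :=
  Char.ofNat (((PySem.Int.ofCharsBase? (chunk.flatMap PySem.Int.toChars) 2).getD 0).toNat)

def pvBitsToString (bits : List Int) : String :=
  String.ofList ((PySem.List.pyRange 0 (bits.length : Int) 8).map (fun i =>
    pvChunkChar (PySem.List.slice bits (some i) (some (i + 8)))))

def sdes_decrypt (ciphertext : String) (key : String) : String :=
  let key_bits := pvStringToBits key
  let ciphertext_bits := pvStringToBits ciphertext
  let ks := pvGenerateKeys (PySem.List.slice key_bits none (some 10))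
  let plaintext_bits := (PySem.List.pyRange 0 (ciphertext_bits.length : Int) 8).foldl
    (fun acc i => acc ++ pvDecryptBlock (PySem.List.slice ciphertext_bits (some i) (some (i + 8))) ks.1 ks.2) []
  pvBitsToString plaintext_bits

-- ===== PORT B =====
-- n and the table entries are Python ints; the shift count n - p is ≥ 0 for every table used, where .toNat is exact
def pvPermInt (v : Int) (n : Int) (table : List Int) : Int :=
  table.foldl (fun out p => PySem.Int.bor (out <<< (1 : Nat)) (PySem.Int.band (v >>> (n - p).toNat) 1)) 0

def pvRol5 (v : Int) (s : Nat) : Int :=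
  PySem.Int.band (PySem.Int.bor (v <<< s) (v >>> (5 - s))) 0x1F

def pvKeysInt (k10 : Int) : Int × Int :=
  let k := pvPermInt k10 10 pvP10
  let l := PySem.Int.band (k >>> (5 : Nat)) 0x1F
  let r := PySem.Int.band k 0x1F
  let l1 := pvRol5 l 1
  let r1 := pvRol5 r 1
  let k1 := pvPermInt (PySem.Int.bor (l1 <<< (5 : Nat)) r1) 10 pvP8
  let l2 := pvRol5 l1 2
  let r2 := pvRol5 r1 2
  let k2 := pvPermInt (PySem.Int.bor (l2 <<< (5 : Nat)) r2) 10 pvP8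
  (k1, k2)

def pvSboxInt (v : Int) (sbox : List (List Int)) : Int :=
  let row := PySem.Int.bor (PySem.Int.band (v >>> (2 : Nat)) 2) (PySem.Int.band v 1)
  let col := PySem.Int.bor ((PySem.Int.band (v >>> (2 : Nat)) 1) <<< (1 : Nat)) (PySem.Int.band (v >>> (1 : Nat)) 1)
  PySem.List.pyGetD (PySem.List.pyGetD sbox row []) col 0

def pvFkInt (b k : Int) : Int :=
  let l := b >>> (4 : Nat)
  let r := PySem.Int.band b 0xF
  let t := PySem.Int.bxor (pvPermInt r 4 pvEP) k
  let s := PySem.Int.bor ((pvSboxInt (t >>> (4 : Nat)) pvS0) <<< (2 : Nat)) (pvSboxInt (PySem.Int.band t 0xF) pvS1)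
  PySem.Int.bor ((PySem.Int.bxor l (pvPermInt s 4 pvP4)) <<< (4 : Nat)) r

-- _enc_block: ENCRYPT one 8-bit block (k1 round first, swap, k2 round)
def pvEncBlockInt (p k1 k2 : Int) : Int :=
  let b0 := pvPermInt p 8 pvIP
  let b1 := pvFkInt b0 k1
  let b2 := PySem.Int.bor ((PySem.Int.band b1 0xF) <<< (4 : Nat)) (b1 >>> (4 : Nat))
  let b3 := pvFkInt b2 k2
  pvPermInt b3 8 pvIPINV

-- key[0] / key[1] raise IndexError for a key shorter than 2 characters (excluded by Pre_); ord = Char.toNat,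
-- chr = Char.ofNat ∘ Int.toNat and the list assignment inv[i] = p uses List.set at i.toNat — both exact here
-- because every value/index produced lies in [0, 256)
def sdes_decrypt_alt (ciphertext : String) (key : String) : String :=
  match PySem.Str.pyGet? key 0, PySem.Str.pyGet? key 1 with
  | some c0, some c1 =>
    let k10 := PySem.Int.bor ((c0.toNat : Int) <<< (2 : Nat)) ((c1.toNat : Int) >>> (6 : Nat))
    let ks := pvKeysInt k10
    let inv := (PySem.List.pyRange 0 256 1).foldl
      (fun acc p => acc.set (pvEncBlockInt p ks.1 ks.2).toNat p) (List.replicate 256 (0 : Int))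
    String.ofList (ciphertext.toList.map (fun ch =>
      Char.ofNat ((PySem.List.pyGetD inv ((ch.toNat : Int)) 0).toNat)))
  | _, _ => ""

-- ===== PRECONDITION & SPEC =====
-- Pre_ excludes keys of fewer than 2 characters: there Python A raises IndexError in permutate
-- (fewer than 10 key bits) and Python B raises IndexError on key[1].
def Pre_sdes_decrypt (ciphertext : String) (key : String) : Prop := 2 ≤ key.toList.length
instance (ciphertext : String) (key : String) : Decidable (Pre_sdes_decrypt ciphertext key) := by
  unfold Pre_sdes_decrypt; infer_instance

def pvWitness_sdes_decrypt : String × String := ("Hi", "ky")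

def Spec_sdes_decrypt (ciphertext : String) (key : String) (out : String) : Prop := out = sdes_decrypt_alt ciphertext key
instance (ciphertext : String) (key : String) (out : String) : Decidable (Spec_sdes_decrypt ciphertext key out) := by
  unfold Spec_sdes_decrypt; infer_instance

-- ===== CLAIM (what is proved, stated in full; the proofs are below) =====
def Claim_equal_sdes_decrypt : Prop := ∀ (ciphertext : String) (key : String), Dom_sdes_decrypt ciphertext key → Pre_sdes_decrypt ciphertext key → Spec_sdes_decrypt ciphertext key (sdes_decrypt ciphertext key)

-- ===== LEMMAS AND PROOFS =====

-- bit i of v (Python (v >> i) & 1) and the big-endian w-bit decomposition of v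
def ibit (v : Int) (i : Nat) : Int := PySem.Int.band (v >>> i) 1
def bitsL (w : Nat) (v : Int) : List Int := (List.range w).reverse.map (fun i => ibit v i)

lemma bitsL2_eq (v : Int) : bitsL 2 v = [ibit v 1, ibit v 0] := rfl
lemma bitsL4_eq (v : Int) : bitsL 4 v = [ibit v 3, ibit v 2, ibit v 1, ibit v 0] := rfl
lemma bitsL5_eq (v : Int) : bitsL 5 v = [ibit v 4, ibit v 3, ibit v 2, ibit v 1, ibit v 0] := rfl
lemma bitsL8_eq (v : Int) : bitsL 8 v =
    [ibit v 7, ibit v 6, ibit v 5, ibit v 4, ibit v 3, ibit v 2, ibit v 1, ibit v 0] := rfl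
lemma bitsL10_eq (v : Int) : bitsL 10 v =
    [ibit v 9, ibit v 8, ibit v 7, ibit v 6, ibit v 5, ibit v 4, ibit v 3, ibit v 2, ibit v 1, ibit v 0] := rfl

lemma bitsL_length (w : Nat) (v : Int) : (bitsL w v).length = w := by simp [bitsL]

-- cast toolkit: push ℕ-casts through the PySem integer operations
lemma zero_bor (a : Int) : PySem.Int.bor 0 a = a := by rw [PySem.Int.bor_comm]; simp
lemma bor_cast (a b : Nat) : PySem.Int.bor (a : Int) (b : Int) = ((a ||| b : Nat) : Int) := by simp
lemma bxor_cast (a b : Nat) : PySem.Int.bxor (a : Int) (b : Int) = ((a ^^^ b : Nat) : Int) := by simp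
lemma band_one_cast (a : Nat) : PySem.Int.band (a : Int) 1 = ((a &&& 1 : Nat) : Int) := by
  have := PySem.Int.band_natCast a 1; simpa using this
lemma band15_cast (a : Nat) : PySem.Int.band (a : Int) 15 = ((a &&& 15 : Nat) : Int) := by
  have := PySem.Int.band_natCast a 15; simpa using this
lemma band31_cast (a : Nat) : PySem.Int.band (a : Int) 31 = ((a &&& 31 : Nat) : Int) := by
  have := PySem.Int.band_natCast a 31; simpa using this
lemma shiftR_cast (a : Nat) (k : Nat) : ((a : Int) >>> k) = ((a >>> k : Nat) : Int) :=
  (Int.natCast_shiftRight a k).symm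
lemma shiftL_cast (a : Nat) (k : Nat) : ((a : Int) <<< k) = ((a <<< k : Nat) : Int) :=
  (Int.natCast_shiftLeft a k).symm

lemma testBit_mod_two (x k : Nat) : (x % 2).testBit k = if k = 0 then x.testBit 0 else false := by
  rcases Nat.mod_two_eq_zero_or_one x with h | h <;> rw [h] <;> rcases k with _ | k <;>
    simp [Nat.testBit, Nat.shiftRight_succ_inside] <;> omega

lemma ibit_cast (m : Nat) (i : Nat) : ibit (m : Int) i = ((if m.testBit i then 1 else 0 : Nat) : Int) := by
  rw [ibit, shiftR_cast, band_one_cast]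
  congr 1
  simp [Nat.testBit, Nat.and_one_is_mod, Nat.and_comm]
  split <;> omega

lemma testBit_high {x n : Nat} (h : x < 2 ^ n) : ∀ j, n ≤ j → x.testBit j = false := by
  intro j hj
  exact Nat.testBit_eq_false_of_lt (h.trans_le (Nat.pow_le_pow_right (by norm_num) hj))

-- the ℕ value computed by pvPermInt, with cast and bound
def nPermInt (m : Nat) (n : Int) (table : List Int) : Nat :=
  table.foldl (fun out p => (out <<< 1) ||| ((m >>> (n - p).toNat) &&& 1)) 0

lemma permInt_aux (table : List Int) (n : Int) (m a : Nat) :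
    List.foldl (fun out p => PySem.Int.bor (out <<< (1 : Nat)) (PySem.Int.band ((m : Int) >>> (n - p).toNat) 1)) (a : Int) table
      = ((List.foldl (fun out p => (out <<< 1) ||| ((m >>> (n - p).toNat) &&& 1)) a table : Nat) : Int) := by
  induction table generalizing a with
  | nil => rfl
  | cons t ts ih =>
      simp only [List.foldl]
      rw [shiftL_cast, shiftR_cast, band_one_cast, bor_cast, ih]

lemma permInt_cast (m : Nat) (n : Int) (table : List Int) :
    pvPermInt (m : Int) n table = ((nPermInt m n table : Nat) : Int) := by
  have h0 : ((0 : Nat) : Int) = (0 : Int) := rfl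
  rw [pvPermInt, nPermInt, ← h0, permInt_aux]

lemma or_bit_step (a b : Nat) (hb : b ≤ 1) : (a <<< 1) ||| b = 2 * a + b := by
  rcases Nat.le_one_iff_eq_zero_or_eq_one.mp hb with h | h <;> subst h
  · simp [Nat.shiftLeft_eq]; ring
  · have h2 : a <<< 1 = 2 * a := by simp [Nat.shiftLeft_eq]; ring
    rw [h2]
    apply Nat.eq_of_testBit_eq
    intro i
    rcases i with _ | i
    · simp
    · rw [Nat.testBit_or]
      have h1 : (1 : Nat).testBit (i + 1) = false := by simp [Nat.testBit_succ]
      have h3 : (2 * a + 1).testBit (i + 1) = (2 * a).testBit (i + 1) := by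
        simp [Nat.testBit_succ]
        congr 1
        omega
      simp [h1, h3]

lemma permInt_lt_aux (table : List Int) (n : Int) (m a : Nat) :
    List.foldl (fun out p => (out <<< 1) ||| ((m >>> (n - p).toNat) &&& 1)) a table < (a + 1) * 2 ^ table.length := by
  induction table generalizing a with
  | nil => simp
  | cons t ts ih =>
      simp only [List.foldl, List.length_cons]
      have hb : (m >>> (n - t).toNat) &&& 1 ≤ 1 := Nat.and_le_right
      rw [or_bit_step _ _ hb]
      calc List.foldl _ (2 * a + ((m >>> (n - t).toNat) &&& 1)) ts
          < (2 * a + ((m >>> (n - t).toNat) &&& 1) + 1) * 2 ^ ts.length := ih _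
        _ ≤ (a + 1) * 2 ^ (ts.length + 1) := by
            rw [pow_succ]
            have hp : 0 < 2 ^ ts.length := Nat.two_pow_pos ts.length
            nlinarith [hp]

lemma nPermInt_lt (m : Nat) (n : Int) (table : List Int) : nPermInt m n table < 2 ^ table.length := by
  have h := permInt_lt_aux table n m 0
  rw [nPermInt]
  calc table.foldl (fun out p => (out <<< 1) ||| ((m >>> (n - p).toNat) &&& 1)) 0
      < (0 + 1) * 2 ^ table.length := h
    _ = 2 ^ table.length := by ring

lemma testBit_15 (i : Nat) : (15 : Nat).testBit i = decide (i < 4) := by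
  rcases Nat.lt_or_ge i 4 with h | h
  · interval_cases i <;> decide
  · rw [testBit_high (show (15 : Nat) < 2 ^ 4 by norm_num) i h]
    simp
    omega

lemma testBit_31 (i : Nat) : (31 : Nat).testBit i = decide (i < 5) := by
  rcases Nat.lt_or_ge i 5 with h | h
  · interval_cases i <;> decide
  · rw [testBit_high (show (31 : Nat) < 2 ^ 5 by norm_num) i h]
    simp
    omega

-- ===== permutation-table lemmas: bit-list permutation vs integer shift/mask permutation =====
lemma perm_IP (m : Nat) : pvPermutate (bitsL 8 (m : Int)) pvIP = bitsL 8 (pvPermInt (m : Int) 8 pvIP) := by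
  simp only [pvPermutate, pvIP, pvPermInt, List.foldl, List.map, bitsL8_eq]
  norm_num [PySem.List.pyGetD, PySem.List.clampIdx]
  simp only [zero_bor, shiftR_cast, shiftL_cast, band_one_cast, bor_cast, ibit_cast]
  simp [Nat.testBit_or, Nat.testBit_shiftLeft, Nat.testBit_shiftRight, testBit_mod_two]

lemma perm_IPINV (m : Nat) : pvPermutate (bitsL 8 (m : Int)) pvIPINV = bitsL 8 (pvPermInt (m : Int) 8 pvIPINV) := by
  simp only [pvPermutate, pvIPINV, pvPermInt, List.foldl, List.map, bitsL8_eq]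
  norm_num [PySem.List.pyGetD, PySem.List.clampIdx]
  simp only [zero_bor, shiftR_cast, shiftL_cast, band_one_cast, bor_cast, ibit_cast]
  simp [Nat.testBit_or, Nat.testBit_shiftLeft, Nat.testBit_shiftRight, testBit_mod_two]

lemma perm_EP (m : Nat) : pvPermutate (bitsL 4 (m : Int)) pvEP = bitsL 8 (pvPermInt (m : Int) 4 pvEP) := by
  simp only [pvPermutate, pvEP, pvPermInt, List.foldl, List.map, bitsL8_eq, bitsL4_eq]
  norm_num [PySem.List.pyGetD, PySem.List.clampIdx]
  simp only [zero_bor, shiftR_cast, shiftL_cast, band_one_cast, bor_cast, ibit_cast]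
  simp [Nat.testBit_or, Nat.testBit_shiftLeft, Nat.testBit_shiftRight, testBit_mod_two]

lemma perm_P4 (m : Nat) : pvPermutate (bitsL 4 (m : Int)) pvP4 = bitsL 4 (pvPermInt (m : Int) 4 pvP4) := by
  simp only [pvPermutate, pvP4, pvPermInt, List.foldl, List.map, bitsL4_eq]
  norm_num [PySem.List.pyGetD, PySem.List.clampIdx]
  simp only [zero_bor, shiftR_cast, shiftL_cast, band_one_cast, bor_cast, ibit_cast]
  simp [Nat.testBit_or, Nat.testBit_shiftLeft, Nat.testBit_shiftRight, testBit_mod_two]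

lemma perm_P10 (m : Nat) : pvPermutate (bitsL 10 (m : Int)) pvP10 = bitsL 10 (pvPermInt (m : Int) 10 pvP10) := by
  simp only [pvPermutate, pvP10, pvPermInt, List.foldl, List.map, bitsL10_eq]
  norm_num [PySem.List.pyGetD, PySem.List.clampIdx]
  simp only [zero_bor, shiftR_cast, shiftL_cast, band_one_cast, bor_cast, ibit_cast]
  simp [Nat.testBit_or, Nat.testBit_shiftLeft, Nat.testBit_shiftRight, testBit_mod_two]

lemma perm_P8 (m : Nat) : pvPermutate (bitsL 10 (m : Int)) pvP8 = bitsL 8 (pvPermInt (m : Int) 10 pvP8) := by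
  simp only [pvPermutate, pvP8, pvPermInt, List.foldl, List.map, bitsL10_eq, bitsL8_eq]
  norm_num [PySem.List.pyGetD, PySem.List.clampIdx]
  simp only [zero_bor, shiftR_cast, shiftL_cast, band_one_cast, bor_cast, ibit_cast]
  simp [Nat.testBit_or, Nat.testBit_shiftLeft, Nat.testBit_shiftRight, testBit_mod_two]

-- ===== slicing / concatenation / xor on bit lists vs shifts and masks =====
lemma take4_bits8 (m : Nat) : PySem.List.slice (bitsL 8 (m : Int)) none (some 4) = bitsL 4 ((m >>> 4 : Nat) : Int) := by
  rw [PySem.List.slice_to _ (by norm_num)]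
  norm_num [bitsL8_eq, bitsL4_eq, List.take]
  simp only [shiftR_cast, band15_cast, ibit_cast]
  simp [Nat.testBit_shiftRight]

lemma drop4_bits8 (m : Nat) : PySem.List.slice (bitsL 8 (m : Int)) (some 4) none = bitsL 4 ((m &&& 15 : Nat) : Int) := by
  rw [PySem.List.slice_from _ (by norm_num)]
  norm_num [bitsL8_eq, bitsL4_eq, List.drop]
  simp only [shiftR_cast, band15_cast, band31_cast, ibit_cast]
  simp [Nat.testBit_and, Nat.testBit_shiftRight, testBit_15, testBit_31]

lemma take5_bits10 (m : Nat) : PySem.List.slice (bitsL 10 (m : Int)) none (some 5) = bitsL 5 ((m >>> 5 : Nat) : Int) := by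
  rw [PySem.List.slice_to _ (by norm_num)]
  norm_num [bitsL10_eq, bitsL5_eq, List.take]
  simp only [shiftR_cast, band31_cast, ibit_cast]
  simp [Nat.testBit_shiftRight]

lemma drop5_bits10 (m : Nat) : PySem.List.slice (bitsL 10 (m : Int)) (some 5) none = bitsL 5 ((m &&& 31 : Nat) : Int) := by
  rw [PySem.List.slice_from _ (by norm_num)]
  norm_num [bitsL10_eq, bitsL5_eq, List.drop]
  simp only [shiftR_cast, band15_cast, band31_cast, ibit_cast]
  simp [Nat.testBit_and, Nat.testBit_shiftRight, testBit_15, testBit_31]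

lemma mask5_bits (x : Nat) : bitsL 5 ((x &&& 31 : Nat) : Int) = bitsL 5 ((x : Nat) : Int) := by
  norm_num [bitsL5_eq]
  simp only [shiftR_cast, band31_cast, ibit_cast]
  simp [Nat.testBit_and, testBit_31]

lemma append22 (x y : Nat) (hy : y < 4) :
    bitsL 2 (x : Int) ++ bitsL 2 (y : Int) = bitsL 4 ((((x <<< 2) ||| y : Nat)) : Int) := by
  have hB := testBit_high (show y < 2 ^ 2 by omega)
  norm_num [bitsL2_eq, bitsL4_eq]
  simp only [shiftL_cast, bor_cast, ibit_cast]
  simp [Nat.testBit_or, Nat.testBit_shiftLeft, hB]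

lemma append44 (x y : Nat) (hy : y < 16) :
    bitsL 4 (x : Int) ++ bitsL 4 (y : Int) = bitsL 8 ((((x <<< 4) ||| y : Nat)) : Int) := by
  have hB := testBit_high (show y < 2 ^ 4 by omega)
  norm_num [bitsL4_eq, bitsL8_eq]
  simp only [shiftL_cast, bor_cast, ibit_cast]
  simp [Nat.testBit_or, Nat.testBit_shiftLeft, hB]

lemma append55 (x y : Nat) (hy : y < 32) :
    bitsL 5 (x : Int) ++ bitsL 5 (y : Int) = bitsL 10 ((((x <<< 5) ||| y : Nat)) : Int) := by
  have hB := testBit_high (show y < 2 ^ 5 by omega)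
  norm_num [bitsL5_eq, bitsL10_eq]
  simp only [shiftL_cast, bor_cast, ibit_cast]
  simp [Nat.testBit_or, Nat.testBit_shiftLeft, hB]

lemma bxor_bit (p q : Bool) :
    PySem.Int.bxor (((if p then 1 else 0 : Nat)) : Int) (((if q then 1 else 0 : Nat)) : Int)
      = (((if p ^^ q then 1 else 0 : Nat)) : Int) := by
  cases p <;> cases q <;> decide

lemma xor4_bits (a b : Nat) :
    pvXor (bitsL 4 (a : Int)) (bitsL 4 (b : Int)) = bitsL 4 ((a ^^^ b : Nat) : Int) := by
  norm_num [pvXor, bitsL4_eq, List.zip]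
  simp only [ibit_cast, bxor_bit]
  simp [Nat.testBit_xor]
  split_ifs <;> omega

lemma xor8_bits (a b : Nat) :
    pvXor (bitsL 8 (a : Int)) (bitsL 8 (b : Int)) = bitsL 8 ((a ^^^ b : Nat) : Int) := by
  norm_num [pvXor, bitsL8_eq, List.zip]
  simp only [ibit_cast, bxor_bit]
  simp [Nat.testBit_xor]
  split_ifs <;> omega

lemma rol5_list1 (x : Nat) (hx : x < 32) :
    pvLeftShift (bitsL 5 (x : Int)) 1 = bitsL 5 (pvRol5 (x : Int) 1) := by
  have hB := testBit_high (show x < 2 ^ 5 by omega)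
  rw [pvLeftShift, PySem.List.slice_from _ (by norm_num), PySem.List.slice_to _ (by norm_num), pvRol5]
  norm_num [bitsL5_eq, List.take, List.drop]
  simp only [shiftR_cast, shiftL_cast, bor_cast, band31_cast, ibit_cast]
  simp [Nat.testBit_or, Nat.testBit_and, Nat.testBit_shiftLeft, Nat.testBit_shiftRight, hB, testBit_31]

lemma rol5_list2 (x : Nat) (hx : x < 32) :
    pvLeftShift (bitsL 5 (x : Int)) 2 = bitsL 5 (pvRol5 (x : Int) 2) := by
  have hB := testBit_high (show x < 2 ^ 5 by omega)
  rw [pvLeftShift, PySem.List.slice_from _ (by norm_num), PySem.List.slice_to _ (by norm_num), pvRol5]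
  norm_num [bitsL5_eq, List.take, List.drop]
  simp only [shiftR_cast, shiftL_cast, bor_cast, band31_cast, ibit_cast]
  simp [Nat.testBit_or, Nat.testBit_and, Nat.testBit_shiftLeft, Nat.testBit_shiftRight, hB, testBit_31]

lemma swap_bits (m : Nat) (hm : m < 256) :
    PySem.List.slice (bitsL 8 (m : Int)) (some 4) none ++ PySem.List.slice (bitsL 8 (m : Int)) none (some 4)
      = bitsL 8 (((((m &&& 15) <<< 4) ||| (m >>> 4) : Nat)) : Int) := by
  rw [take4_bits8, drop4_bits8]
  have h1 : m >>> 4 < 16 := by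
    have := Nat.shiftRight_eq_div_pow m 4
    omega
  exact append44 _ _ h1

-- ===== the ℕ-level cipher (shared reading of both ports; proof-only definitions) =====
def nSbox (m : Nat) (sbox : List (List Int)) : Nat :=
  (PySem.List.pyGetD (PySem.List.pyGetD sbox ((((m >>> 2) &&& 2) ||| (m &&& 1) : Nat) : Int) [])
    ((((((m >>> 2) &&& 1) <<< 1) ||| ((m >>> 1) &&& 1) : Nat)) : Int) 0).toNat

def nFkRound (r k : Nat) : Nat :=
  nPermInt ((nSbox ((nPermInt r 4 pvEP ^^^ k) >>> 4) pvS0 <<< 2) |||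
    nSbox ((nPermInt r 4 pvEP ^^^ k) &&& 15) pvS1) 4 pvP4

def nFk (b k : Nat) : Nat := (((b >>> 4) ^^^ nFkRound (b &&& 15) k) <<< 4) ||| (b &&& 15)

def nSwap (b : Nat) : Nat := ((b &&& 15) <<< 4) ||| (b >>> 4)

def nEnc (k1 k2 p : Nat) : Nat := nPermInt (nFk (nSwap (nFk (nPermInt p 8 pvIP) k1)) k2) 8 pvIPINV

def nDec (k1 k2 c : Nat) : Nat := nPermInt (nFk (nSwap (nFk (nPermInt c 8 pvIP) k2)) k1) 8 pvIPINV

-- ===== finite enumeration lemmas (S-boxes, IP∘IP⁻¹, and the character/bit boundary) =====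
set_option maxRecDepth 40000 in
lemma fmt8_bits : ∀ c : Fin 128,
    (PySem.Chars.zfill (PySem.Int.toBinChars ((c.val : Nat) : Int)) 8).map pvDigit = bitsL 8 ((c.val : Nat) : Int) := by
  decide

set_option maxRecDepth 40000 in
lemma chunkChar_bits : ∀ w : Fin 256, pvChunkChar (bitsL 8 ((w.val : Nat) : Int)) = Char.ofNat w.val := by
  decide

set_option maxRecDepth 40000 in
lemma sbox_list : ∀ v : Fin 16,
    pvSboxLookup (bitsL 4 ((v.val : Nat) : Int)) pvS0 = bitsL 2 ((nSbox v.val pvS0 : Nat) : Int) ∧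
    pvSboxLookup (bitsL 4 ((v.val : Nat) : Int)) pvS1 = bitsL 2 ((nSbox v.val pvS1 : Nat) : Int) ∧
    nSbox v.val pvS0 < 4 ∧ nSbox v.val pvS1 < 4 := by
  decide

set_option maxRecDepth 100000 in
lemma sbox_cast : ∀ v : Fin 256,
    pvSboxInt ((v.val : Nat) : Int) pvS0 = ((nSbox v.val pvS0 : Nat) : Int) ∧
    pvSboxInt ((v.val : Nat) : Int) pvS1 = ((nSbox v.val pvS1 : Nat) : Int) := by
  decide

set_option maxRecDepth 100000 in
lemma ip_invol : ∀ m : Fin 256,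
    nPermInt (nPermInt m.val 8 pvIP) 8 pvIPINV = m.val ∧
    nPermInt (nPermInt m.val 8 pvIPINV) 8 pvIP = m.val := by
  decide

lemma fmt8_bits' (m : Nat) (hm : m < 128) :
    (PySem.Chars.zfill (PySem.Int.toBinChars ((m : Nat) : Int)) 8).map pvDigit = bitsL 8 ((m : Nat) : Int) :=
  fmt8_bits ⟨m, hm⟩

lemma chunkChar_bits' (m : Nat) (hm : m < 256) : pvChunkChar (bitsL 8 ((m : Nat) : Int)) = Char.ofNat m :=
  chunkChar_bits ⟨m, hm⟩

-- ===== arithmetic on 4-bit halves =====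
lemma hi4 (b : Nat) : b >>> 4 = b / 16 :=
  Nat.shiftRight_eq_div_pow b 4

lemma lo4 (b : Nat) : b &&& 15 = b % 16 := by
  have h := Nat.and_two_pow_sub_one_eq_mod b 4
  norm_num at h
  exact h

lemma or16 (x y : Nat) (hy : y < 16) : (x <<< 4) ||| y = 16 * x + y := by
  rw [← Nat.shiftLeft_add_eq_or_of_lt (by omega : y < 2 ^ 4), Nat.shiftLeft_eq]
  ring

lemma nPermInt_lt_P4 (m : Nat) : nPermInt m 4 pvP4 < 16 := by
  have := nPermInt_lt m 4 pvP4; norm_num [pvP4] at this; exact this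
lemma nPermInt_lt_EP (m : Nat) : nPermInt m 4 pvEP < 256 := by
  have := nPermInt_lt m 4 pvEP; norm_num [pvEP] at this; exact this
lemma nPermInt_lt_IP (m : Nat) : nPermInt m 8 pvIP < 256 := by
  have := nPermInt_lt m 8 pvIP; norm_num [pvIP] at this; exact this
lemma nPermInt_lt_IPINV (m : Nat) : nPermInt m 8 pvIPINV < 256 := by
  have := nPermInt_lt m 8 pvIPINV; norm_num [pvIPINV] at this; exact this
lemma nPermInt_lt_P8 (m : Nat) : nPermInt m 10 pvP8 < 256 := by
  have := nPermInt_lt m 10 pvP8; norm_num [pvP8] at this; exact this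

lemma shiftRight4_lt (x : Nat) (hx : x < 256) : x >>> 4 < 16 := by
  rw [hi4]; omega

lemma and15_lt (x : Nat) : x &&& 15 < 16 := by rw [lo4]; omega
lemma and31_lt (x : Nat) : x &&& 31 < 32 := lt_of_le_of_lt Nat.and_le_right (by norm_num)

lemma nFkRound_lt (r k : Nat) : nFkRound r k < 16 := nPermInt_lt_P4 _

lemma nFk_lt (b k : Nat) (hb : b < 256) : nFk b k < 256 := by
  rw [nFk, or16 _ _ (and15_lt b)]
  have h1 : (b >>> 4) ^^^ nFkRound (b &&& 15) k < 16 := by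
    have := Nat.xor_lt_two_pow (n := 4) (x := b >>> 4) (y := nFkRound (b &&& 15) k)
      (by have := shiftRight4_lt b hb; norm_num; omega)
      (by have := nFkRound_lt (b &&& 15) k; norm_num; omega)
    norm_num at this; omega
  have h2 := and15_lt b
  omega

lemma nSwap_lt (b : Nat) (hb : b < 256) : nSwap b < 256 := by
  rw [nSwap, or16 _ _ (shiftRight4_lt b hb)]
  have := and15_lt b
  have := shiftRight4_lt b hb
  omega

lemma hi_of_or16 (x y : Nat) (hx : x < 16) (hy : y < 16) : ((x <<< 4) ||| y) >>> 4 = x := by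
  rw [or16 _ _ hy, hi4]; omega

lemma lo_of_or16 (x y : Nat) (hy : y < 16) : ((x <<< 4) ||| y) &&& 15 = y := by
  rw [or16 _ _ hy, lo4]; omega

lemma recomb4 (b : Nat) (hb : b < 256) : ((b >>> 4) <<< 4) ||| (b &&& 15) = b := by
  rw [or16 _ _ (and15_lt b), hi4, lo4]; omega

lemma nFk_invol (b k : Nat) (hb : b < 256) : nFk (nFk b k) k = b := by
  have hx : (b >>> 4) ^^^ nFkRound (b &&& 15) k < 16 := by
    have := Nat.xor_lt_two_pow (n := 4) (x := b >>> 4) (y := nFkRound (b &&& 15) k)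
      (by have := shiftRight4_lt b hb; norm_num; omega)
      (by have := nFkRound_lt (b &&& 15) k; norm_num; omega)
    norm_num at this; omega
  conv_lhs => rw [nFk, nFk]
  rw [hi_of_or16 _ _ hx (and15_lt b), lo_of_or16 _ _ (and15_lt b)]
  rw [Nat.xor_assoc, Nat.xor_self, Nat.xor_zero]
  exact recomb4 b hb

lemma nSwap_invol (b : Nat) (hb : b < 256) : nSwap (nSwap b) = b := by
  conv_lhs => rw [nSwap, nSwap]
  rw [hi_of_or16 _ _ (and15_lt b) (shiftRight4_lt b hb),
    lo_of_or16 _ _ (shiftRight4_lt b hb)]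
  have h := recomb4 b hb
  rw [Nat.or_comm] at h ⊢
  exact h

lemma nDec_lt (k1 k2 c : Nat) : nDec k1 k2 c < 256 := nPermInt_lt_IPINV _
lemma nEnc_lt (k1 k2 p : Nat) : nEnc k1 k2 p < 256 := nPermInt_lt_IPINV _

lemma nDec_nEnc (k1 k2 p : Nat) (hp : p < 256) : nDec k1 k2 (nEnc k1 k2 p) = p := by
  rw [nDec, nEnc]
  have h0 : nPermInt p 8 pvIP < 256 := nPermInt_lt_IP p
  have h1 : nFk (nPermInt p 8 pvIP) k1 < 256 := nFk_lt _ _ h0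
  have h2 : nSwap (nFk (nPermInt p 8 pvIP) k1) < 256 := nSwap_lt _ h1
  have h3 : nFk (nSwap (nFk (nPermInt p 8 pvIP) k1)) k2 < 256 := nFk_lt _ _ h2
  rw [(ip_invol ⟨nFk (nSwap (nFk (nPermInt p 8 pvIP) k1)) k2, h3⟩).2]
  rw [nFk_invol _ _ h2, nSwap_invol _ h1, nFk_invol _ _ h0]
  exact (ip_invol ⟨p, hp⟩).1

lemma nEnc_nDec (k1 k2 c : Nat) (hc : c < 256) : nEnc k1 k2 (nDec k1 k2 c) = c := by
  rw [nDec, nEnc]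
  have h0 : nPermInt c 8 pvIP < 256 := nPermInt_lt_IP c
  have h1 : nFk (nPermInt c 8 pvIP) k2 < 256 := nFk_lt _ _ h0
  have h2 : nSwap (nFk (nPermInt c 8 pvIP) k2) < 256 := nSwap_lt _ h1
  have h3 : nFk (nSwap (nFk (nPermInt c 8 pvIP) k2)) k1 < 256 := nFk_lt _ _ h2
  rw [(ip_invol ⟨nFk (nSwap (nFk (nPermInt c 8 pvIP) k2)) k1, h3⟩).2]
  rw [nFk_invol _ _ h2, nSwap_invol _ h1, nFk_invol _ _ h0]
  exact (ip_invol ⟨c, hc⟩).1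

-- ===== the list-level round equals the ℕ-level round =====
lemma fkList (b k : Nat) (hb : b < 256) (hk : k < 256) :
    pvFk (bitsL 8 (b : Int)) (bitsL 8 (k : Int)) = bitsL 8 ((nFk b k : Nat) : Int) := by
  simp only [pvFk]
  set tn := nPermInt (b &&& 15) 4 pvEP ^^^ k with htn_def
  have htn : tn < 256 := by
    have h := Nat.xor_lt_two_pow (n := 8) (x := nPermInt (b &&& 15) 4 pvEP) (y := k)
      (by have := nPermInt_lt_EP (b &&& 15); norm_num; omega) (by norm_num; omega)
    norm_num at h; omega
  have thi : tn >>> 4 < 16 := shiftRight4_lt tn htn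
  have tlo : tn &&& 15 < 16 := and15_lt tn
  obtain ⟨hs0list, _, _, _⟩ := sbox_list ⟨tn >>> 4, thi⟩
  obtain ⟨_, hs1list, _, hs1lt⟩ := sbox_list ⟨tn &&& 15, tlo⟩
  rw [take4_bits8, drop4_bits8, perm_EP, permInt_cast, xor8_bits, ← htn_def,
    take4_bits8, drop4_bits8, hs0list, hs1list,
    append22 _ _ hs1lt, perm_P4, permInt_cast, xor4_bits,
    show nPermInt ((nSbox (tn >>> 4) pvS0 <<< 2) ||| nSbox (tn &&& 15) pvS1) 4 pvP4
      = nFkRound (b &&& 15) k from by rw [nFkRound, ← htn_def],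
    append44 _ _ (and15_lt b)]
  rfl

lemma blockRel (m k1 k2 : Nat) (hm : m < 256) (h1 : k1 < 256) (h2 : k2 < 256) :
    pvDecryptBlock (bitsL 8 ((m : Nat) : Int)) (bitsL 8 ((k1 : Nat) : Int)) (bitsL 8 ((k2 : Nat) : Int))
      = bitsL 8 ((nDec k1 k2 m : Nat) : Int) := by
  simp only [pvDecryptBlock]
  have h0 : nPermInt m 8 pvIP < 256 := nPermInt_lt_IP m
  have hr1 : nFk (nPermInt m 8 pvIP) k2 < 256 := nFk_lt _ _ h0
  rw [perm_IP, permInt_cast, fkList _ _ h0 h2, swap_bits _ hr1]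
  have hsw : (((nFk (nPermInt m 8 pvIP) k2 &&& 15) <<< 4) ||| (nFk (nPermInt m 8 pvIP) k2 >>> 4))
      = nSwap (nFk (nPermInt m 8 pvIP) k2) := rfl
  rw [hsw, fkList _ _ (nSwap_lt _ hr1) h1, perm_IPINV, permInt_cast]
  rfl

-- ===== Int-level port B equals the ℕ-level cipher =====
lemma sbox_cast0 (v : Nat) (hv : v < 256) : pvSboxInt ((v : Nat) : Int) pvS0 = ((nSbox v pvS0 : Nat) : Int) :=
  (sbox_cast ⟨v, hv⟩).1
lemma sbox_cast1 (v : Nat) (hv : v < 256) : pvSboxInt ((v : Nat) : Int) pvS1 = ((nSbox v pvS1 : Nat) : Int) :=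
  (sbox_cast ⟨v, hv⟩).2

lemma fkInt_cast (b k : Nat) (hk : k < 256) : pvFkInt (b : Int) (k : Int) = ((nFk b k : Nat) : Int) := by
  have htn : nPermInt (b &&& 15) 4 pvEP ^^^ k < 256 := by
    have h := Nat.xor_lt_two_pow (n := 8) (x := nPermInt (b &&& 15) 4 pvEP) (y := k)
      (by have := nPermInt_lt_EP (b &&& 15); norm_num; omega) (by norm_num; omega)
    norm_num at h; omega
  simp only [pvFkInt, band15_cast, permInt_cast, bxor_cast, shiftR_cast]
  rw [sbox_cast0 _ (lt_of_lt_of_le (shiftRight4_lt _ htn) (by norm_num)),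
    sbox_cast1 _ (lt_of_lt_of_le (and15_lt _) (by norm_num))]
  simp only [shiftL_cast, bor_cast, permInt_cast, bxor_cast]
  rfl

lemma encInt_cast (p k1 k2 : Nat) (h1 : k1 < 256) (h2 : k2 < 256) :
    pvEncBlockInt ((p : Nat) : Int) ((k1 : Nat) : Int) ((k2 : Nat) : Int) = ((nEnc k1 k2 p : Nat) : Int) := by
  simp only [pvEncBlockInt]
  rw [permInt_cast, fkInt_cast _ _ h1, band15_cast, shiftL_cast, shiftR_cast, bor_cast,
    show (((nFk (nPermInt p 8 pvIP) k1 &&& 15) <<< 4) ||| (nFk (nPermInt p 8 pvIP) k1 >>> 4))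
      = nSwap (nFk (nPermInt p 8 pvIP) k1) from rfl,
    fkInt_cast _ _ h2, permInt_cast]
  rfl

-- ===== the inverse table: fold of writes table[enc p] := p reads back as dec =====
lemma foldSet_length (f : Nat → Nat) (l : List Nat) (L : List Int) :
    (l.foldl (fun acc p => acc.set (f p) ((p : Nat) : Int)) L).length = L.length := by
  induction l generalizing L with
  | nil => rfl
  | cons x xs ih => simp [List.foldl, ih, List.length_set]

set_option maxRecDepth 40000 in
lemma tblAux (f g : Nat → Nat)
    (hf : ∀ p < 256, f p < 256)
    (hgf : ∀ p < 256, g (f p) = p)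
    (hfg : ∀ c < 256, f (g c) = c) :
    ∀ n, n ≤ 256 → ∀ c, c < 256 →
      ((List.range n).foldl (fun acc p => acc.set (f p) ((p : Nat) : Int)) (List.replicate 256 (0 : Int))).getD c 0
        = if g c < n then ((g c : Nat) : Int) else 0 := by
  intro n
  induction n with
  | zero =>
      intro _ c hc
      rw [List.range_zero, List.foldl_nil, if_neg (Nat.not_lt_zero _), List.getD,
        List.getElem?_replicate, if_pos hc]
      rfl
  | succ n ih =>
      intro hn c hc
      rw [List.range_succ, List.foldl_append, List.foldl_cons, List.foldl_nil]
      have hlen : ((List.range n).foldl (fun acc p => acc.set (f p) ((p : Nat) : Int)) (List.replicate 256 (0 : Int))).length = 256 := by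
        rw [foldSet_length]; simp
      by_cases hcfn : c = f n
      · have hgc : g c = n := by rw [hcfn, hgf n (by omega)]
        rw [List.getD, List.getElem?_set, if_pos (by omega), hlen, if_pos (by rw [← hcfn]; omega)]
        simp [hgc]
      · rw [List.getD, List.getElem?_set, if_neg (fun h => hcfn h.symm), ← List.getD]
        rw [ih (by omega) c hc]
        have : (g c < n + 1) ↔ (g c < n) := by
          constructor
          · intro h
            rcases Nat.lt_or_ge (g c) n with h' | h'
            · exact h'
            · exfalso; apply hcfn
              have : g c = n := by omega
              rw [← hfg c hc, this]
          · omega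
        simp only [this]

-- ===== the first ten key bits =====
lemma key10_bits (a b : Nat) (hb : b < 128) (L : List Int) :
    List.take 10 (bitsL 8 ((a : Nat) : Int) ++ (bitsL 8 ((b : Nat) : Int) ++ L))
      = bitsL 10 ((((a <<< 2) ||| (b >>> 6) : Nat)) : Int) := by
  have hB := testBit_high (show b < 2 ^ 8 by omega)
  norm_num [bitsL8_eq, bitsL10_eq, List.take_succ_cons]
  simp only [shiftL_cast, shiftR_cast, bor_cast, ibit_cast]
  simp [Nat.testBit_or, Nat.testBit_shiftLeft, Nat.testBit_shiftRight, hB]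

-- ===== key schedule: list version and Int version produce the same two round keys =====
lemma keysRel (t : Nat) (ht : t < 1024) :
    ∃ n1 n2 : Nat, n1 < 256 ∧ n2 < 256 ∧ (pvKeysInt (t : Int)).1 = (n1 : Int) ∧ (pvKeysInt (t : Int)).2 = (n2 : Int) ∧
      pvGenerateKeys (bitsL 10 (t : Int)) = (bitsL 8 ((n1 : Nat) : Int), bitsL 8 ((n2 : Nat) : Int)) := by
  set p := nPermInt t 10 pvP10 with hp_def
  set la := (p >>> 5) &&& 31 with hla_def
  set ra := p &&& 31 with hra_def
  set l1 := ((la <<< 1) ||| (la >>> 4)) &&& 31 with hl1_def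
  set r1 := ((ra <<< 1) ||| (ra >>> 4)) &&& 31 with hr1_def
  set l2 := ((l1 <<< 2) ||| (l1 >>> 3)) &&& 31 with hl2_def
  set r2 := ((r1 <<< 2) ||| (r1 >>> 3)) &&& 31 with hr2_def
  have hrol1l : pvRol5 ((la : Nat) : Int) 1 = ((l1 : Nat) : Int) := by
    rw [pvRol5, shiftL_cast, shiftR_cast, bor_cast, band31_cast]
  have hrol1r : pvRol5 ((ra : Nat) : Int) 1 = ((r1 : Nat) : Int) := by
    rw [pvRol5, shiftL_cast, shiftR_cast, bor_cast, band31_cast]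
  have hrol2l : pvRol5 ((l1 : Nat) : Int) 2 = ((l2 : Nat) : Int) := by
    rw [pvRol5, shiftL_cast, shiftR_cast, bor_cast, band31_cast]
  have hrol2r : pvRol5 ((r1 : Nat) : Int) 2 = ((r2 : Nat) : Int) := by
    rw [pvRol5, shiftL_cast, shiftR_cast, bor_cast, band31_cast]
  refine ⟨nPermInt ((l1 <<< 5) ||| r1) 10 pvP8, nPermInt ((l2 <<< 5) ||| r2) 10 pvP8,
    nPermInt_lt_P8 _, nPermInt_lt_P8 _, ?_, ?_, ?_⟩
  · simp only [pvKeysInt]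
    rw [permInt_cast, ← hp_def, shiftR_cast, band31_cast, ← hla_def, band31_cast, ← hra_def,
      hrol1l, hrol1r, shiftL_cast, bor_cast, permInt_cast]
  · simp only [pvKeysInt]
    rw [permInt_cast, ← hp_def, shiftR_cast, band31_cast, ← hla_def, band31_cast, ← hra_def,
      hrol1l, hrol1r, hrol2l, hrol2r, shiftL_cast, bor_cast, permInt_cast]
  · simp only [pvGenerateKeys]
    rw [perm_P10, permInt_cast, ← hp_def, take5_bits10, drop5_bits10, ← mask5_bits (p >>> 5),
      ← hla_def, ← hra_def]
    rw [rol5_list1 la (and31_lt _), rol5_list1 ra (and31_lt _), hrol1l, hrol1r,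
      rol5_list2 l1 (and31_lt _), rol5_list2 r1 (and31_lt _), hrol2l, hrol2r,
      append55 l1 r1 (and31_lt _), append55 l2 r2 (and31_lt _),
      perm_P8, permInt_cast, perm_P8, permInt_cast]

-- ===== chunking: the range-of-len-step-8 loops work chunk by chunk =====
lemma pyRange8 (n : Nat) :
    PySem.List.pyRange 0 ((8 * n : Nat) : Int) 8 = (List.range n).map (fun k => ((8 * k : Nat) : Int)) := by
  rw [PySem.List.pyRange_of_pos 0 ((8 * n : Nat) : Int) (s := 8) (by norm_num)]
  rcases Nat.eq_zero_or_pos n with h | h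
  · subst h; simp
  · rw [if_pos (by push_cast; omega)]
    have hc : ((((8 * n : Nat) : Int) - 0 + 8 - 1) / 8).toNat = n := by
      have h1 : (((8 * n : Nat) : Int) - 0 + 8 - 1) = 7 + (n : Int) * 8 := by push_cast; ring
      rw [h1, Int.add_mul_ediv_right _ _ (by norm_num)]
      norm_num
    rw [hc]
    apply List.map_congr_left
    intro k _
    push_cast
    ring

lemma flatten8_len (chunks : List (List Int)) (h : ∀ c ∈ chunks, c.length = 8) :
    chunks.flatten.length = 8 * chunks.length := by
  induction chunks with
  | nil => simp
  | cons c cs ih =>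
      have hc := h c (by simp)
      have ih' := ih (fun d hd => h d (by simp [hd]))
      simp [hc, ih']
      omega

lemma slice_chunk_shift (c rest : List Int) (hc : c.length = 8) (k : Nat) :
    PySem.List.slice (c ++ rest) (some ((8 * (k + 1) : Nat) : Int)) (some (((8 * (k + 1) : Nat) : Int) + 8))
      = PySem.List.slice rest (some ((8 * k : Nat) : Int)) (some (((8 * k : Nat) : Int) + 8)) := by
  have h1 : (((8 * (k + 1) : Nat) : Int) + 8) = (((8 * (k + 1) + 8 : Nat)) : Int) := by push_cast; ring
  have h2 : (((8 * k : Nat) : Int) + 8) = (((8 * k + 8 : Nat)) : Int) := by push_cast; ring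
  rw [h1, h2, PySem.List.slice_natCast, PySem.List.slice_natCast]
  rw [show 8 * (k + 1) = c.length + 8 * k by omega, List.drop_append,
    List.drop_of_length_le (show c.length ≤ c.length + 8 * k by omega), List.nil_append]
  congr 1
  · omega
  · congr 1
    omega

lemma slice_chunk_zero (c rest : List Int) (hc : c.length = 8) (i : Int) (hi : i = 0) :
    PySem.List.slice (c ++ rest) (some i) (some (i + 8)) = c := by
  subst hi
  norm_num
  rw [show (8 : Int) = ((8 : Nat) : Int) by norm_num, PySem.List.slice_to_natCast]
  rw [List.take_append_of_le_length (by omega), List.take_of_length_le (by omega)]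

lemma foldChunks (g : List Int → List Int) (chunks : List (List Int)) (h : ∀ c ∈ chunks, c.length = 8) :
    ∀ init : List Int,
    (List.range chunks.length).foldl
        (fun acc k => acc ++ g (PySem.List.slice chunks.flatten (some ((8 * k : Nat) : Int)) (some (((8 * k : Nat) : Int) + 8)))) init
      = init ++ (chunks.map g).flatten := by
  induction chunks with
  | nil => intro init; simp
  | cons c cs ih =>
      intro init
      have hc := h c (by simp)
      have hcs : ∀ d ∈ cs, d.length = 8 := fun d hd => h d (by simp [hd])
      rw [List.length_cons, List.range_succ_eq_map, List.foldl_cons, List.foldl_map]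
      simp only [Nat.succ_eq_add_one, List.flatten_cons]
      rw [slice_chunk_zero c cs.flatten hc _ (by norm_num)]
      rw [PySem.List.foldl_congr_mem (List.range cs.length)
        (fun acc k => acc ++ g (PySem.List.slice (c ++ cs.flatten) (some ((8 * (k + 1) : Nat) : Int)) (some (((8 * (k + 1) : Nat) : Int) + 8))))
        (fun acc k => acc ++ g (PySem.List.slice cs.flatten (some ((8 * k : Nat) : Int)) (some (((8 * k : Nat) : Int) + 8))))
        (init ++ g c)
        (fun acc k _ => by simp only [slice_chunk_shift c cs.flatten hc k])]
      rw [ih hcs (init ++ g c)]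
      simp

lemma mapChunks (chunks : List (List Int)) (h : ∀ c ∈ chunks, c.length = 8) :
    (List.range chunks.length).map
        (fun k => pvChunkChar (PySem.List.slice chunks.flatten (some ((8 * k : Nat) : Int)) (some (((8 * k : Nat) : Int) + 8))))
      = chunks.map pvChunkChar := by
  induction chunks with
  | nil => simp
  | cons c cs ih =>
      have hc := h c (by simp)
      have hcs : ∀ d ∈ cs, d.length = 8 := fun d hd => h d (by simp [hd])
      rw [List.length_cons, List.range_succ_eq_map, List.map_cons, List.map_map]
      simp only [Nat.succ_eq_add_one, List.flatten_cons, Function.comp_apply]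
      rw [slice_chunk_zero c cs.flatten hc _ (by norm_num)]
      rw [List.map_cons]
      congr 1
      rw [← ih hcs]
      apply List.map_congr_left
      intro k _
      simp only [Function.comp_apply, Nat.succ_eq_add_one]
      rw [slice_chunk_shift c cs.flatten hc k]

-- ===== per-character form of string_to_bits on the admitted domain =====
lemma domChar_lt (c : Char) (h : pvDomChar c = true) : c.toNat < 128 := by
  simp [pvDomChar] at h
  omega

lemma s2b_dom (l : List Char) (h : ∀ c ∈ l, pvDomChar c = true) :
    l.flatMap (fun ch => (PySem.Chars.zfill (PySem.Int.toBinChars ((ch.toNat : Nat) : Int)) 8).map pvDigit)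
      = (l.map (fun c => bitsL 8 ((c.toNat : Nat) : Int))).flatten := by
  induction l with
  | nil => simp
  | cons c cs ih =>
      rw [List.flatMap_cons, List.map_cons, List.flatten_cons,
        fmt8_bits' c.toNat (domChar_lt c (h c (by simp))), ih (fun d hd => h d (by simp [hd]))]

lemma blockLen (mv n1 n2 : Nat) (hm : mv < 256) (h1 : n1 < 256) (h2 : n2 < 256) :
    (pvDecryptBlock (bitsL 8 ((mv : Nat) : Int)) (bitsL 8 ((n1 : Nat) : Int)) (bitsL 8 ((n2 : Nat) : Int))).length = 8 := by
  rw [blockRel mv n1 n2 hm h1 h2, bitsL_length]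

-- ===== VERDICT (by name: the statement is the Claim_ definition above) =====
theorem sdes_decrypt_spec : Claim_equal_sdes_decrypt := by
  intro ct key hdom hpre
  unfold Spec_sdes_decrypt
  have hdom' := hdom
  unfold Dom_sdes_decrypt at hdom'
  rw [Bool.and_eq_true] at hdom'
  obtain ⟨hct, hkey⟩ := hdom'
  rw [pvDomStr, List.all_eq_true] at hct hkey
  unfold Pre_sdes_decrypt at hpre
  -- key = c0 :: c1 :: rest
  obtain ⟨c0, t1, h1⟩ := List.exists_cons_of_ne_nil
    (show key.toList ≠ [] by intro h; rw [h] at hpre; simp at hpre)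
  obtain ⟨c1, rest, h2⟩ := List.exists_cons_of_ne_nil
    (show t1 ≠ [] by intro h; rw [h] at h1; rw [h1] at hpre; simp at hpre)
  have hksh : key.toList = c0 :: c1 :: rest := by rw [h1, h2]
  have ha : c0.toNat < 128 := domChar_lt c0 (hkey c0 (by rw [hksh]; simp))
  have hb : c1.toNat < 128 := domChar_lt c1 (hkey c1 (by rw [hksh]; simp))
  -- the ten key bits and the two round keys
  set t := (c0.toNat <<< 2) ||| (c1.toNat >>> 6) with ht_def
  have ht : t < 1024 := by
    have h := Nat.or_lt_two_pow (n := 10) (x := c0.toNat <<< 2) (y := c1.toNat >>> 6)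
      (by rw [Nat.shiftLeft_eq]; norm_num; omega)
      (by have : c1.toNat >>> 6 ≤ c1.toNat := Nat.shiftRight_le _ _; norm_num; omega)
    norm_num at h; omega
  obtain ⟨n1, n2, hn1, hn2, hk1eq, hk2eq, hkeys⟩ := keysRel t ht
  have hkb : PySem.List.slice (pvStringToBits key) none (some 10) = bitsL 10 ((t : Nat) : Int) := by
    rw [pvStringToBits, hksh, List.flatMap_cons, List.flatMap_cons,
      fmt8_bits' c0.toNat ha, fmt8_bits' c1.toNat hb,
      PySem.List.slice_to _ (by norm_num)]
    exact key10_bits c0.toNat c1.toNat hb _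
  -- ciphertext chunks
  set chunks := ct.toList.map (fun c => bitsL 8 ((c.toNat : Nat) : Int)) with hchunks_def
  have hcb : pvStringToBits ct = chunks.flatten := by
    rw [pvStringToBits, s2b_dom ct.toList hct]
  have hlen8 : ∀ c ∈ chunks, c.length = 8 := by
    intro c hc
    rw [hchunks_def] at hc
    obtain ⟨ch, _, rfl⟩ := List.mem_map.mp hc
    exact bitsL_length 8 _
  have hctlt : ∀ ch ∈ ct.toList, ch.toNat < 256 := fun ch hch => by
    have := domChar_lt ch (hct ch hch); omega
  -- A side
  rw [sdes_decrypt]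
  rw [hkb, hkeys, hcb, flatten8_len chunks hlen8]
  rw [pyRange8 chunks.length, List.foldl_map]
  rw [foldChunks (fun blk => pvDecryptBlock blk (bitsL 8 ((n1 : Nat) : Int)) (bitsL 8 ((n2 : Nat) : Int))) chunks hlen8 []]
  rw [List.nil_append]
  have hlen8' : ∀ d ∈ chunks.map (fun blk => pvDecryptBlock blk (bitsL 8 ((n1 : Nat) : Int)) (bitsL 8 ((n2 : Nat) : Int))), d.length = 8 := by
    intro d hd
    obtain ⟨c, hc, rfl⟩ := List.mem_map.mp hd
    rw [hchunks_def] at hc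
    obtain ⟨ch, hch, rfl⟩ := List.mem_map.mp hc
    exact blockLen ch.toNat n1 n2 (hctlt ch hch) hn1 hn2
  rw [pvBitsToString, flatten8_len _ hlen8']
  rw [pyRange8, List.length_map, List.map_map]
  simp only [Function.comp_def]
  have hmc := mapChunks (chunks.map (fun blk => pvDecryptBlock blk (bitsL 8 ((n1 : Nat) : Int)) (bitsL 8 ((n2 : Nat) : Int)))) hlen8'
  rw [List.length_map] at hmc
  rw [hmc]
  -- B side
  have hg0 : PySem.Str.pyGet? key 0 = some c0 := by simp [pysem, hksh]
  have hg1 : PySem.Str.pyGet? key 1 = some c1 := by simp [pysem, hksh]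
  simp only [sdes_decrypt_alt, hg0, hg1]
  rw [shiftL_cast, shiftR_cast, bor_cast, ← ht_def]
  simp only [hk1eq, hk2eq]
  -- the table: pyRange 0 256 1 over ℕ, each write at index nEnc n1 n2 p
  have hrange : PySem.List.pyRange 0 256 1 = (List.range 256).map (fun k => ((k : Nat) : Int)) := by
    rw [PySem.List.pyRange_one 0 256]
    norm_num
    rfl
  rw [hrange, List.foldl_map]
  have hstep : (List.range 256).foldl
      (fun (acc : List Int) (p : Nat) => acc.set (pvEncBlockInt ((p : Nat) : Int) ((n1 : Nat) : Int) ((n2 : Nat) : Int)).toNat ((p : Nat) : Int))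
      (List.replicate 256 (0 : Int))
      = (List.range 256).foldl
      (fun (acc : List Int) (p : Nat) => acc.set (nEnc n1 n2 p) ((p : Nat) : Int))
      (List.replicate 256 (0 : Int)) := by
    apply PySem.List.foldl_congr_mem
    intro acc p hp
    rw [encInt_cast p n1 n2 hn1 hn2, Int.toNat_natCast]
  rw [hstep]
  set inv := (List.range 256).foldl
      (fun (acc : List Int) (p : Nat) => acc.set (nEnc n1 n2 p) ((p : Nat) : Int))
      (List.replicate 256 (0 : Int)) with hinv_def
  have hlook : ∀ c : Nat, c < 256 → inv.getD c 0 = ((nDec n1 n2 c : Nat) : Int) := by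
    intro c hc
    rw [hinv_def, tblAux (nEnc n1 n2) (nDec n1 n2)
      (fun p _ => nEnc_lt n1 n2 p)
      (fun p hp => nDec_nEnc n1 n2 p hp)
      (fun c hc => nEnc_nDec n1 n2 c hc)
      256 (le_refl _) c hc]
    rw [if_pos (nDec_lt n1 n2 c)]
  -- compare the two per-character maps
  rw [hchunks_def, List.map_map, List.map_map]
  apply congrArg
  apply List.map_congr_left
  intro ch hch
  simp only [Function.comp_apply]
  rw [blockRel ch.toNat n1 n2 (hctlt ch hch) hn1 hn2,
    chunkChar_bits' _ (nDec_lt n1 n2 ch.toNat),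
    PySem.List.pyGetD_natCast, hlook ch.toNat (hctlt ch hch), Int.toNat_natCast]
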